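-- pv_equiv track=rewrite | github.com/bwks/experiments-stubarea51-evpn-vxlan-interop-ipv4-ipv6-mikrotik-cisco | pyats_tests/libs/parsers.py | bgp_session_established_ios
-- ===== SOURCE A (Python) =====
-- def bgp_session_established_ios(output, neighbor_ip):
--     """Check if BGP neighbor is established on IOS-XE.
--
--     Handles case-insensitive matching for IPv6 addresses.
--     IOS-XE wraps long IPv6 neighbors across two lines:
--         3FFF:1AB:D127:D50::101
--                     4   4208675309   ...   0
--     """
--     lines = output.splitlines()
--     for i, line in enumerate(lines):
--         if neighbor_ip.lower() in line.lower():
--             # Check current line first (IPv4 — all on one line)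
--             parts = line.split()
--             if parts:
--                 try:
--                     int(parts[-1])
--                     return True
--                 except ValueError:
--                     pass
--             # IPv6 wrap: data is on the next line
--             if i + 1 < len(lines):
--                 next_parts = lines[i + 1].split()
--                 if next_parts:
--                     try:
--                         int(next_parts[-1])
--                         return True
--                     except ValueError:
--                         pass
--     return False
-- ===== SOURCE B (Python) =====
-- def bgp_session_established_ios(output, neighbor_ip):
--     """Backward single pass: walk the lines in reverse carrying the next
--     line's 'ends in an integer' flag; no indices, no lookahead."""
--     needle = neighbor_ip.lower()
--     next_has_int = False
--     for line in reversed(output.splitlines()):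
--         parts = line.split()
--         try:
--             int(parts[-1])
--             has_int = True
--         except (ValueError, IndexError):
--             has_int = False
--         if needle in line.lower() and (has_int or next_has_int):
--             return True
--         next_has_int = has_int
--     return False
-- ===== Notes on version B (the rewrite author's own statement) =====
-- stated objective: alternative
-- what changed: B replaces A's forward indexed scan with next-line lookahead (enumerate, i+1 bounds check, re-splitting the next line) by a single backward pass over reversed(lines) that carries the previously-visited line's 'ends in an integer' flag as an accumulator, eliminating indices and lookahead entirely; correct because the result is an existential over lines.
import Mathlib
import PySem

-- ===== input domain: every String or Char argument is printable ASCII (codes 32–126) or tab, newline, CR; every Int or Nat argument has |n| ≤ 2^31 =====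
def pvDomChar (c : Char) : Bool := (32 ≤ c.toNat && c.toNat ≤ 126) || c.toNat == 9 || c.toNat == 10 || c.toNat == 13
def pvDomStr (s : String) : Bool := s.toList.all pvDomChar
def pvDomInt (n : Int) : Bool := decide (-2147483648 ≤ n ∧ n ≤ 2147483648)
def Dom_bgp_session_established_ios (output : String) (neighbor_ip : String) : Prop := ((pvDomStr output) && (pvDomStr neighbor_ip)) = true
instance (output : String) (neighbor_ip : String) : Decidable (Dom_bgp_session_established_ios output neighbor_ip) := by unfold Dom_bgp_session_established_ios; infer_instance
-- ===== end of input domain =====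

-- B replaces A's forward indexed scan with next-line lookahead by a single
-- backward pass carrying the previous line's int-flag (objective: alternative;
-- not claimed faster).

-- ===== PORT A =====
-- A's loop: for each enumerated line containing the neighbor, check the
-- current line's last token, then (on fall-through) the next line's.
def pvAGo (lines : List String) (neighbor_ip : String) : List (Int × String) → Bool
  | [] => false
  | (i, line) :: rest =>
    if PySem.Str.isIn (PySem.Str.lower neighbor_ip) (PySem.Str.lower line) then
      let parts := PySem.Str.split₀ line
      -- "if parts: try int(parts[-1]): return True except: pass"
      if parts ≠ [] ∧ (PySem.Int.ofStr? (PySem.List.pyGetD parts (-1) "")).isSome then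
        true
      else if i + 1 < (lines.length : Int) then
        let next_parts := PySem.Str.split₀ (PySem.List.pyGetD lines (i + 1) "")
        if next_parts ≠ [] ∧ (PySem.Int.ofStr? (PySem.List.pyGetD next_parts (-1) "")).isSome then
          true
        else pvAGo lines neighbor_ip rest
      else pvAGo lines neighbor_ip rest
    else pvAGo lines neighbor_ip rest

def bgp_session_established_ios (output : String) (neighbor_ip : String) : Bool :=
  let lines := PySem.Str.splitlines output
  pvAGo lines neighbor_ip (PySem.List.enumerate lines 0)

-- ===== PORT B =====
-- "try: int(parts[-1]); has_int = True except (ValueError, IndexError): has_int = False"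
def pvRowHasInt (line : String) : Bool :=
  match PySem.List.pyGet? (PySem.Str.split₀ line) (-1) with
  | none => false                                  -- IndexError on empty parts
  | some t => (PySem.Int.ofStr? t).isSome          -- ValueError ↦ false

-- the backward pass: flag = has_int of the line processed just before (the
-- line AFTER the current one in the original order)
def pvBGoRev (needle : String) : Bool → List String → Bool
  | _, [] => false
  | nextFlag, line :: rest =>
    let hasInt := pvRowHasInt line
    if PySem.Str.isIn needle (PySem.Str.lower line) && (hasInt || nextFlag) then true
    else pvBGoRev needle hasInt rest

def bgp_session_established_ios_alt (output : String) (neighbor_ip : String) : Bool :=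
  pvBGoRev (PySem.Str.lower neighbor_ip) false (PySem.Str.splitlines output).reverse

-- ===== PRECONDITION & SPEC =====
def Spec_bgp_session_established_ios (output : String) (neighbor_ip : String) (out : Bool) : Prop := out = bgp_session_established_ios_alt output neighbor_ip
instance (output : String) (neighbor_ip : String) (out : Bool) : Decidable (Spec_bgp_session_established_ios output neighbor_ip out) := by unfold Spec_bgp_session_established_ios; infer_instance

-- ===== CLAIM (what is proved, stated in full; the proofs are below) =====
def Claim_equal_bgp_session_established_ios : Prop := ∀ (output : String) (neighbor_ip : String), Dom_bgp_session_established_ios output neighbor_ip → Spec_bgp_session_established_ios output neighbor_ip (bgp_session_established_ios output neighbor_ip)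

-- ===== LEMMAS AND PROOFS =====

-- per-line hit of the reference recursion
def pvHit (needle line : String) (flag : Bool) : Bool :=
  PySem.Str.isIn needle (PySem.Str.lower line) && (pvRowHasInt line || flag)

def pvHeadFlag : List String → Bool → Bool
  | [], flag => flag
  | b :: _, _ => pvRowHasInt b

-- reference: forward recursion with one-line lookahead; flag = int-flag of
-- the (virtual) line after the list
def pvRef (needle : String) : List String → Bool → Bool
  | [], _ => false
  | a :: t, flag => pvHit needle a (pvHeadFlag t flag) || pvRef needle t flag

-- A's inline current-line check equals pvRowHasInt
lemma pvRowHasInt_eq (line : String) :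
    pvRowHasInt line
      = decide ((PySem.Str.split₀ line) ≠ [] ∧
          (PySem.Int.ofStr? (PySem.List.pyGetD (PySem.Str.split₀ line) (-1) "")).isSome) := by
  unfold pvRowHasInt
  rw [PySem.List.pyGet?_neg_one]
  cases h : (PySem.Str.split₀ line).getLast? with
  | none =>
    simp [List.getLast?_eq_none_iff.mp h]
  | some t =>
    have hne : PySem.Str.split₀ line ≠ [] := by
      intro hnil; rw [hnil] at h; simp at h
    rw [PySem.List.pyGetD_neg_one _ "" hne]
    rw [List.getLast?_eq_some_getLast hne] at h
    simp_all

lemma pvBGoRev_cons (needle a : String) (flag : Bool) (l : List String) :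
    pvBGoRev needle flag (a :: l)
      = (pvHit needle a flag || pvBGoRev needle (pvRowHasInt a) l) := by
  show (if (PySem.Str.isIn needle (PySem.Str.lower a) && (pvRowHasInt a || flag)) = true
        then true else pvBGoRev needle (pvRowHasInt a) l)
      = (pvHit needle a flag || pvBGoRev needle (pvRowHasInt a) l)
  unfold pvHit
  cases h : (PySem.Str.isIn needle (PySem.Str.lower a) && (pvRowHasInt a || flag)) <;> simp

lemma pvBGoRev_append (needle : String) (flag : Bool) (xs ys : List String) :
    pvBGoRev needle flag (xs ++ ys)
      = (pvBGoRev needle flag xs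
          || pvBGoRev needle (xs.getLast?.elim flag pvRowHasInt) ys) := by
  induction xs generalizing flag with
  | nil => simp [pvBGoRev]
  | cons a xs ih =>
    rw [List.cons_append, pvBGoRev_cons, pvBGoRev_cons, ih]
    have hlast : (a :: xs).getLast?.elim flag pvRowHasInt
        = xs.getLast?.elim (pvRowHasInt a) pvRowHasInt := by
      cases xs with
      | nil => rfl
      | cons b xs' =>
        rw [List.getLast?_cons_cons]
        cases h : (b :: xs').getLast? with
        | none => exact absurd (List.getLast?_eq_none_iff.mp h) (by simp)
        | some y => rfl
    rw [hlast, Bool.or_assoc]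

lemma pvBGoRev_reverse (needle : String) (s : List String) (flag : Bool) :
    pvBGoRev needle flag s.reverse = pvRef needle s flag := by
  induction s generalizing flag with
  | nil => rfl
  | cons a t ih =>
    rw [List.reverse_cons, pvBGoRev_append, ih]
    have hlast : t.reverse.getLast?.elim flag pvRowHasInt = pvHeadFlag t flag := by
      cases t with
      | nil => rfl
      | cons b t' => simp [List.getLast?_reverse, pvHeadFlag]
    rw [hlast, pvBGoRev_cons]
    show (pvRef needle t flag || (pvHit needle a (pvHeadFlag t flag) || false))
        = (pvHit needle a (pvHeadFlag t flag) || pvRef needle t flag)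
    simp [Bool.or_comm]

-- A's loop body as one boolean condition followed by the recursive call
lemma pvAGo_cons (lines : List String) (nb line : String) (i : Int)
    (rest : List (Int × String)) :
    pvAGo lines nb ((i, line) :: rest)
      = ((PySem.Str.isIn (PySem.Str.lower nb) (PySem.Str.lower line) &&
            (pvRowHasInt line ||
              (decide (i + 1 < (lines.length : Int)) &&
                pvRowHasInt (PySem.List.pyGetD lines (i + 1) ""))))
          || pvAGo lines nb rest) := by
  show (if PySem.Str.isIn (PySem.Str.lower nb) (PySem.Str.lower line) = true then
          if (PySem.Str.split₀ line) ≠ [] ∧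
              (PySem.Int.ofStr? (PySem.List.pyGetD (PySem.Str.split₀ line) (-1) "")).isSome then
            true
          else if i + 1 < (lines.length : Int) then
            if (PySem.Str.split₀ (PySem.List.pyGetD lines (i + 1) "")) ≠ [] ∧
                (PySem.Int.ofStr? (PySem.List.pyGetD
                  (PySem.Str.split₀ (PySem.List.pyGetD lines (i + 1) "")) (-1) "")).isSome then
              true
            else pvAGo lines nb rest
          else pvAGo lines nb rest
        else pvAGo lines nb rest) = _
  rw [pvRowHasInt_eq line, pvRowHasInt_eq (PySem.List.pyGetD lines (i + 1) "")]
  cases hin : PySem.Str.isIn (PySem.Str.lower nb) (PySem.Str.lower line) with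
  | false => rw [if_neg (by simp)]; simp
  | true =>
    rw [if_pos rfl, Bool.true_and]
    by_cases hc1 : (PySem.Str.split₀ line) ≠ [] ∧
        (PySem.Int.ofStr? (PySem.List.pyGetD (PySem.Str.split₀ line) (-1) "")).isSome
    · rw [if_pos hc1]; simp [hc1]
    · rw [if_neg hc1]
      by_cases hlt : i + 1 < (lines.length : Int)
      · rw [if_pos hlt]
        by_cases hc2 : (PySem.Str.split₀ (PySem.List.pyGetD lines (i + 1) "")) ≠ [] ∧
            (PySem.Int.ofStr? (PySem.List.pyGetD
              (PySem.Str.split₀ (PySem.List.pyGetD lines (i + 1) "")) (-1) "")).isSome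
        · rw [if_pos hc2]; simp [hc1, hlt, hc2]
        · rw [if_neg hc2]; simp [hc1, hlt, hc2]
      · rw [if_neg hlt]; simp [hc1, hlt]

-- A's indexed scan over the suffix lines.drop n equals the reference
lemma pvAGo_eq_ref (lines : List String) (nb : String) :
    ∀ (s : List String) (n : Nat), lines.drop n = s →
      pvAGo lines nb (PySem.List.enumerate s (n : Int))
        = pvRef (PySem.Str.lower nb) s false := by
  intro s
  induction s with
  | nil => intro n _; rfl
  | cons a t ih =>
    intro n hdrop
    have hlen : n + t.length + 1 = lines.length := by
      have h1 := congrArg List.length hdrop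
      rw [List.length_drop] at h1
      simp at h1
      omega
    have hdrop1 : lines.drop (n + 1) = t := by
      rw [← List.tail_drop, hdrop]; rfl
    have ihrest : pvAGo lines nb (PySem.List.enumerate t ((n : Int) + 1))
        = pvRef (PySem.Str.lower nb) t false := by
      have := ih (n + 1) hdrop1
      simpa [Int.natCast_add] using this
    rw [PySem.List.enumerate_cons, pvAGo_cons, ihrest]
    show ((PySem.Str.isIn (PySem.Str.lower nb) (PySem.Str.lower a) &&
            (pvRowHasInt a ||
              (decide ((n : Int) + 1 < (lines.length : Int)) &&
                pvRowHasInt (PySem.List.pyGetD lines ((n : Int) + 1) ""))))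
          || pvRef (PySem.Str.lower nb) t false)
        = (pvHit (PySem.Str.lower nb) a (pvHeadFlag t false)
            || pvRef (PySem.Str.lower nb) t false)
    congr 1
    unfold pvHit
    congr 1
    cases t with
    | nil =>
      have hnlt : ¬ ((n : Int) + 1 < (lines.length : Int)) := by
        simp at hlen; omega
      simp [hnlt, pvHeadFlag]
    | cons b t' =>
      have hlt : (n : Int) + 1 < (lines.length : Int) := by
        simp at hlen; omega
      have hget : PySem.List.pyGetD lines ((n : Int) + 1) "" = b := by
        have hcast : ((n : Int) + 1) = ((n + 1 : Nat) : Int) := by push_cast; ring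
        rw [hcast, PySem.List.pyGetD_natCast]
        have hb : lines[n + 1]? = some b := by
          have := congrArg (fun l => l[0]?) hdrop1
          simpa [List.getElem?_drop] using this
        simp [List.getD_eq_getElem?_getD, hb]
      simp [hlt, hget, pvHeadFlag]

-- ===== VERDICT (by name: the statement is the Claim_ definition above) =====
theorem bgp_session_established_ios_spec : Claim_equal_bgp_session_established_ios := by
  intro output neighbor_ip _
  unfold Spec_bgp_session_established_ios bgp_session_established_ios bgp_session_established_ios_alt
  rw [pvBGoRev_reverse]
  exact pvAGo_eq_ref (PySem.Str.splitlines output) neighbor_ip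
    (PySem.Str.splitlines output) 0 (by simp)
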